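-- pv_equiv track=rewrite | github.com/xu-kai-xu/algorithm-practice | 844-比较含退格的字符串.py | string_process
-- ===== SOURCE A (Python) =====
-- def string_process(strings):
--     # 对字符串进行处理 转换成列表
--     new = []
--     for i in strings:
--         if (i == '#') and (len(new) != 0):
--             new.pop()
--         elif (i == '#') and (len(new) == 0):
--             pass
--         else:
--             new.append(i)
--
--     return new
-- ===== SOURCE B (Python) =====
-- def string_process(strings):
--     # right-to-left scan with a skip counter instead of a left-to-right stack
--     res = []
--     skip = 0
--     for c in reversed(strings):
--         if c == '#':
--             skip += 1
--         elif skip > 0: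
--             skip -= 1
--         else:
--             res.append(c)
--     res.reverse()
--     return res
-- ===== Notes on version B (the rewrite author's own statement) =====
-- stated objective: alternative
-- what changed: Replaced the left-to-right stack with pop() by a right-to-left single pass keeping an integer skip counter, reversing the collected characters at the end.
import Mathlib
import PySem

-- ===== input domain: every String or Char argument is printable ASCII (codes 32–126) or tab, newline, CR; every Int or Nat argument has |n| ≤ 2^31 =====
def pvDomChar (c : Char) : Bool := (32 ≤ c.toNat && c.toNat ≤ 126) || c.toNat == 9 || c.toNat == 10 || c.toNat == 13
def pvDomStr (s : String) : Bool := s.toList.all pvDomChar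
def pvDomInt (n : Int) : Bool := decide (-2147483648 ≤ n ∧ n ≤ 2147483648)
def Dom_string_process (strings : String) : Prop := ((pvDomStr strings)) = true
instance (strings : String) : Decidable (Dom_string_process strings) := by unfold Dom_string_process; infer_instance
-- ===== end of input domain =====

-- B replaces A's left-to-right stack (pop on '#') by a right-to-left pass with a skip counter; same value everywhere.

-- ===== PORT A =====
-- A: scan left to right, '#' pops the last kept character (no-op on empty), others are appended.
def pvStepA (new : List String) (i : Char) : List String :=
  if i == '#' && new.length != 0 then new.dropLast
  else if i == '#' && new.length == 0 then new
  else new ++ [String.mk [i]]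

def string_process (strings : String) : List String :=
  strings.toList.foldl pvStepA []

-- ===== PORT B =====
-- B: scan right to left with state (res, skip); '#' bumps skip, skip > 0 swallows a char, else keep it; reverse res at the end.
def pvStepB (st : List String × Nat) (c : Char) : List String × Nat :=
  if c == '#' then (st.1, st.2 + 1)
  else if st.2 > 0 then (st.1, st.2 - 1)
  else (st.1 ++ [String.mk [c]], st.2)

def string_process_alt (strings : String) : List String :=
  (strings.toList.reverse.foldl pvStepB ([], 0)).1.reverse

-- ===== PRECONDITION & SPEC =====
def Spec_string_process (strings : String) (out : List String) : Prop := out = string_process_alt strings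
instance (strings : String) (out : List String) : Decidable (Spec_string_process strings out) := by unfold Spec_string_process; infer_instance

-- ===== CLAIM (what is proved, stated in full; the proofs are below) =====
def Claim_equal_string_process : Prop := ∀ (strings : String), Dom_string_process strings → Spec_string_process strings (string_process strings)

-- ===== LEMMAS AND PROOFS =====

-- iterate dropLast k times: the "k pending deletions" of B's skip counter applied to A's stack
def pvDln : Nat → List String → List String
  | 0, xs => xs
  | k + 1, xs => pvDln k xs.dropLast

theorem pvDln_nil (k : Nat) : pvDln k [] = [] := by
  induction k with
  | zero => rfl
  | succ k ih => simpa [pvDln] using ih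

theorem pvDln_concat (k : Nat) (xs : List String) (c : String) :
    pvDln (k + 1) (xs ++ [c]) = pvDln k xs := by
  simp [pvDln]

-- key invariant: A's fold from any initial stack equals the pending deletions applied to it,
-- followed by the reverse of B's collected list (B expressed as a foldr over the original list)
theorem pvKey (l : List Char) : ∀ (init : List String),
    l.foldl pvStepA init =
      pvDln (l.foldr (fun c st => pvStepB st c) ([], 0)).2 init
        ++ (l.foldr (fun c st => pvStepB st c) ([], 0)).1.reverse := by
  induction l with
  | nil => intro init; simp [pvDln]
  | cons c l ih =>
    intro init
    simp only [List.foldl_cons, List.foldr_cons]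
    rw [ih (pvStepA init c)]
    set st := l.foldr (fun c st => pvStepB st c) ([], 0) with hst
    by_cases hc : c = '#'
    · subst hc
      have h1 : pvStepA init '#' = init.dropLast := by
        rcases init with _ | ⟨x, xs⟩ <;> simp [pvStepA]
      simp [h1, pvStepB, pvDln]
    · have hcb : (c == '#') = false := by simp [hc]
      have h1 : pvStepA init c = init ++ [String.mk [c]] := by simp [pvStepA, hcb]
      rcases hk : st.2 with _ | k
      · simp [h1, pvStepB, hcb, hk, pvDln]
      · simp [h1, pvStepB, hcb, hk, pvDln_concat]

-- ===== VERDICT (by name: the statement is the Claim_ definition above) =====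
theorem string_process_spec : Claim_equal_string_process := by
  intro s _
  unfold Spec_string_process string_process string_process_alt
  rw [List.foldl_reverse]
  rw [pvKey s.toList []]
  simp [pvDln_nil]
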